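-- pv_equiv track=rewrite | github.com/xlouisjungx/jungle_baekjoon_study | WEEK02/2805.py | FindWood
-- ===== SOURCE A (Python) =====
-- def FindWood(Trees: list, M):
--
--     Trees.sort()
--
--     start = 0
--     end = Trees[-1]
--     MaxL = 0
--
--
--
--     while start <= end:
--
--         mid = (start + end) // 2
--         total = 0
--
--         for i in Trees:
--             if i > mid:
--                 total += i - mid
--
--         if total < M:
--             end = mid - 1
--
--         # 이쪽 조건문을 바꾸었더니 통과함...왜 일까 좀 찝찝하다(몰라서 그런듯?)
--
--         # 처음에는 if total > M 으로 했었는데, 이때 오류가 시간초과였고, 지피티 말로는 너무 모든 경우를 계산하려고 해서,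
--         # 시간 초과 오류가 나온다고 함.
--
--         # 이분탐색은 중간값을 찾고, 비교하여 범위를 다시 설정해서 비교하는 방식이라고 이해했는데....
--         # 조건문에서 더 작을때만 봐주고, 나머지는 다 else처리해서 경우의 수가 줄었나? 라는 생각이 든다
--         # 팀원이 알려준 파라메트릭 서치를 안써서 더 찝찝한거 같기도 합니다.
--
--
--         else:
--             MaxL = mid
--             start = mid + 1
--
--
--     return MaxL
-- ===== SOURCE B (Python) =====
-- def FindWood(Trees: list, M):
--     top = max(Trees)
--     if top < 0:
--         return 0
--     if M <= 0:
--         return top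
--     S = 0
--     c = 0
--     hi = top
--     for v in sorted((t for t in Trees if t > 0), reverse=True):
--         if v <= hi:
--             if c > 0:
--                 cand = (S - M) // c
--                 if cand >= v:
--                     return cand if cand < hi else hi
--             hi = v - 1
--         S += v
--         c += 1
--     if c > 0:
--         cand = (S - M) // c
--         if cand >= 0:
--             return cand if cand < hi else hi
--     return 0
-- ===== Notes on version B (the rewrite author's own statement) =====
-- stated objective: faster
-- what changed: A binary-searches the cut height and rescans all n trees at every step; B sorts once, sweeps the trees in descending order with a running suffix sum/count, and solves each constant-count segment of cut heights with a single floor division, so no search over heights remains.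
-- outside the precondition, e.g. on FindWood([], 5): A raises IndexError, B raises ValueError
import Mathlib
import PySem

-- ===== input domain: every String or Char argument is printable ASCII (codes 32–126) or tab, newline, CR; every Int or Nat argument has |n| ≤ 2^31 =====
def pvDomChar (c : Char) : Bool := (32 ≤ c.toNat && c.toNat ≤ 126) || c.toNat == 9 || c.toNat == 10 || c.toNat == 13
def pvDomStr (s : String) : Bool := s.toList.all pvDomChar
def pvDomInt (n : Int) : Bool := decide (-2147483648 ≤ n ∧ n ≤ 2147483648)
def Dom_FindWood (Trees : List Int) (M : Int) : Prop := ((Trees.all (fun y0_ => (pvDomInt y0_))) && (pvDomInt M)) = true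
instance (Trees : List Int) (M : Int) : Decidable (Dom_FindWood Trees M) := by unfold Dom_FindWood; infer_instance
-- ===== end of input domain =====

-- B replaces A's O(n) rescan at every binary-search step by one sorted sweep with running
-- suffix sums and a per-segment closed form (objective: faster). A sorts Trees in place;
-- the equivalence proved here is about the return value only (B does not mutate Trees).

-- ===== PORT A =====
-- the inner "for i in Trees: if i > mid: total += i - mid" loop
def FindWoodTotal (l : List Int) (mid : Int) : Int :=
  l.foldl (fun total i => if i > mid then total + (i - mid) else total) 0

-- the "while start <= end" binary-search loop of A
def FindWoodLoop (l : List Int) (M : Int) (start stop MaxL : Int) : Int :=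
  if hse : start ≤ stop then
    -- mid = (start + end) // 2
    if FindWoodTotal l (PySem.Int.floordiv (start + stop) 2) < M then
      FindWoodLoop l M start (PySem.Int.floordiv (start + stop) 2 - 1) MaxL
    else
      FindWoodLoop l M (PySem.Int.floordiv (start + stop) 2 + 1) stop
        (PySem.Int.floordiv (start + stop) 2)
  else MaxL
termination_by (stop - start + 1).toNat
decreasing_by
  · have h := PySem.Int.floordiv_two_mid_bounds hse
    omega
  · have h := PySem.Int.floordiv_two_mid_bounds hse
    omega

def FindWood (Trees : List Int) (M : Int) : Int :=
  let ts := PySem.List.sorted Trees (fun x => x) false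
  -- Trees[-1]: raises IndexError on []; Pre_FindWood excludes the empty list
  let stop := PySem.List.pyGetD ts (-1) 0
  FindWoodLoop ts M 0 stop 0

-- ===== PORT B =====
-- B's descending sweep: S,c = sum/count of the values already passed (all > hi),
-- each segment of cut heights solved by one floor division
def FindWoodAltLoop (M : Int) : List Int → Int → Int → Int → Int
  | [], S, c, hi =>
    if 0 < c then
      let cand := PySem.Int.floordiv (S - M) c
      if 0 ≤ cand then (if cand < hi then cand else hi) else 0
    else 0
  | v :: rest, S, c, hi =>
    if v ≤ hi then
      if 0 < c then
        let cand := PySem.Int.floordiv (S - M) c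
        if v ≤ cand then (if cand < hi then cand else hi)
        else FindWoodAltLoop M rest (S + v) (c + 1) (v - 1)
      else FindWoodAltLoop M rest (S + v) (c + 1) (v - 1)
    else FindWoodAltLoop M rest (S + v) (c + 1) hi

def FindWood_alt (Trees : List Int) (M : Int) : Int :=
  match PySem.List.max? Trees (fun x => x) with
  | none => 0   -- max(Trees) raises ValueError on []; outside Pre_FindWood
  | some top =>
    if top < 0 then 0
    else if M ≤ 0 then top
    else FindWoodAltLoop M
      (PySem.List.sorted (Trees.filter (fun t => 0 < t)) (fun x => x) true) 0 0 top

-- ===== PRECONDITION & SPEC =====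
-- Pre_ excludes only the empty list, on which A raises IndexError (Trees[-1]).
def Pre_FindWood (Trees : List Int) (M : Int) : Prop := Trees ≠ []
instance (Trees : List Int) (M : Int) : Decidable (Pre_FindWood Trees M) := by unfold Pre_FindWood; infer_instance
def pvWitness_FindWood : List Int × Int := ([20, 15, 10, 17], 7)

def Spec_FindWood (Trees : List Int) (M : Int) (out : Int) : Prop := out = FindWood_alt Trees M
instance (Trees : List Int) (M : Int) (out : Int) : Decidable (Spec_FindWood Trees M out) := by unfold Spec_FindWood; infer_instance

-- ===== CLAIM (what is proved, stated in full; the proofs are below) =====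
def Claim_equal_FindWood : Prop := ∀ (Trees : List Int) (M : Int), Dom_FindWood Trees M → Pre_FindWood Trees M → Spec_FindWood Trees M (FindWood Trees M)

-- ===== LEMMAS AND PROOFS =====

-- wood obtained at cut height h
def wsum (l : List Int) (h : Int) : Int :=
  (l.map (fun i => if h < i then i - h else 0)).sum

-- the common characterization: r is 0 or feasible, and nothing above r (up to T) is feasible
def WChar (Trees : List Int) (M T r : Int) : Prop :=
  0 ≤ r ∧ r ≤ T ∧ (M ≤ wsum Trees r ∨ r = 0) ∧ ∀ h, r < h → h ≤ T → wsum Trees h < M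

theorem wsum_perm {l l' : List Int} (h : l.Perm l') (x : Int) : wsum l x = wsum l' x :=
  List.Perm.sum_eq (List.Perm.map _ h)

theorem wsum_append (a b : List Int) (h : Int) : wsum (a ++ b) h = wsum a h + wsum b h := by
  simp [wsum]

theorem wsum_zero_of_le {l : List Int} {h : Int} (hle : ∀ x ∈ l, x ≤ h) : wsum l h = 0 := by
  induction l with
  | nil => simp [wsum]
  | cons a t ih =>
    have ha : ¬ h < a := by have := hle a (by simp); omega
    simp only [wsum, List.map_cons, List.sum_cons, if_neg ha]
    have := ih (fun x hx => hle x (by simp [hx]))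
    simp [wsum] at this
    omega

theorem wsum_eq_of_gt {l : List Int} {h : Int} (hgt : ∀ x ∈ l, h < x) :
    wsum l h = l.sum - h * l.length := by
  induction l with
  | nil => simp [wsum]
  | cons a t ih =>
    have ha : h < a := hgt a (by simp)
    have ht := ih (fun x hx => hgt x (by simp [hx]))
    simp only [wsum, List.map_cons, List.sum_cons, List.length_cons, if_pos ha]
    simp only [wsum] at ht
    rw [ht]
    push_cast
    ring

theorem wsum_anti {l : List Int} {h h' : Int} (hle : h ≤ h') : wsum l h' ≤ wsum l h := by
  induction l with
  | nil => simp [wsum]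
  | cons a t ih =>
    simp only [wsum, List.map_cons, List.sum_cons] at *
    have : (if h' < a then a - h' else 0) ≤ (if h < a then a - h else 0) := by
      split_ifs <;> omega
    omega

theorem WChar_unique {Trees : List Int} {M T r1 r2 : Int}
    (h1 : WChar Trees M T r1) (h2 : WChar Trees M T r2) : r1 = r2 := by
  obtain ⟨h10, h1T, h1ok, h1up⟩ := h1
  obtain ⟨h20, h2T, h2ok, h2up⟩ := h2
  rcases lt_trichotomy r1 r2 with hlt | heq | hgt
  · exfalso
    have hbad := h1up r2 hlt h2T
    rcases h2ok with hok | hz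
    · omega
    · omega
  · exact heq
  · exfalso
    have hbad := h2up r1 hgt h1T
    rcases h1ok with hok | hz
    · omega
    · omega

theorem foldl_total (l : List Int) (mid a : Int) :
    l.foldl (fun total i => if i > mid then total + (i - mid) else total) a = a + wsum l mid := by
  induction l generalizing a with
  | nil => simp [wsum]
  | cons x t ih =>
    simp only [List.foldl_cons, wsum, List.map_cons, List.sum_cons, gt_iff_lt]
    rw [ih]
    simp only [wsum]
    split_ifs <;> omega

theorem findWoodTotal_eq (l : List Int) (mid : Int) : FindWoodTotal l mid = wsum l mid := by
  simpa using foldl_total l mid 0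

-- A's binary-search loop satisfies the characterization
theorem loopA_char (l : List Int) (M T : Int) (hT : 0 ≤ T) :
    ∀ n start stop MaxL, (stop - start + 1).toNat ≤ n → 0 ≤ start → stop ≤ T →
    (start = 0 ∧ MaxL = 0 ∨ (start = MaxL + 1 ∧ 0 ≤ MaxL ∧ MaxL ≤ stop ∧ M ≤ wsum l MaxL)) →
    (∀ h, stop < h → h ≤ T → wsum l h < M) →
    WChar l M T (FindWoodLoop l M start stop MaxL) := by
  intro n
  induction n with
  | zero =>
    intro start stop MaxL hn h0 hsT hinv hreg
    have hgt : ¬ start ≤ stop := by omega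
    rw [FindWoodLoop, dif_neg hgt]
    rcases hinv with ⟨hs, hm⟩ | ⟨hs, hm0, hms, hok⟩
    · exact ⟨by omega, by omega, Or.inr hm, fun h hh hhT => hreg h (by omega) hhT⟩
    · have hstop : MaxL = stop := by omega
      exact ⟨hm0, by omega, Or.inl hok, fun h hh hhT => hreg h (by omega) hhT⟩
  | succ n ih =>
    intro start stop MaxL hn h0 hsT hinv hreg
    by_cases hse : start ≤ stop
    · rw [FindWoodLoop, dif_pos hse, findWoodTotal_eq]
      have hmid := PySem.Int.floordiv_two_mid_bounds hse
      set mid := PySem.Int.floordiv (start + stop) 2 with hmiddef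
      by_cases htot : wsum l mid < M
      · rw [if_pos htot]
        refine ih start (mid - 1) MaxL (by omega) h0 (by omega) ?_ ?_
        · rcases hinv with ⟨hs, hm⟩ | ⟨hs, hm0, hms, hok⟩
          · exact Or.inl ⟨hs, hm⟩
          · exact Or.inr ⟨hs, hm0, by omega, hok⟩
        · intro h hh hhT
          have hmono : wsum l h ≤ wsum l mid := wsum_anti (by omega)
          omega
      · rw [if_neg htot]
        refine ih (mid + 1) stop mid (by omega) (by omega) hsT ?_ hreg
        exact Or.inr ⟨rfl, by omega, by omega, by omega⟩
    · rw [FindWoodLoop, dif_neg hse]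
      rcases hinv with ⟨hs, hm⟩ | ⟨hs, hm0, hms, hok⟩
      · exact ⟨by omega, by omega, Or.inr hm, fun h hh hhT => hreg h (by omega) hhT⟩
      · exact ⟨hm0, by omega, Or.inl hok, fun h hh hhT => hreg h (by omega) hhT⟩

-- decompose wsum over the whole input given the sweep state
theorem wsum_state (Trees done rest : List Int) (S c h hi : Int)
    (hperm : (done ++ rest).Perm (Trees.filter (fun t => decide (0 < t))))
    (hsum : S = done.sum) (hc : c = (done.length : Int))
    (hd : ∀ x ∈ done, hi < x) (hrle : ∀ x ∈ rest, x ≤ h)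
    (h0 : 0 ≤ h) (hhi : h ≤ hi) :
    wsum Trees h = S - h * c := by
  have hsplit : (Trees.filter (fun t => decide (0 < t)) ++
      Trees.filter (fun t => !(decide (0 < t)))).Perm Trees := List.filter_append_perm _ _
  have e1 : wsum Trees h = wsum (Trees.filter (fun t => decide (0 < t))) h +
      wsum (Trees.filter (fun t => !(decide (0 < t)))) h := by
    rw [← wsum_perm hsplit h, wsum_append]
  have e2 : wsum (Trees.filter (fun t => !(decide (0 < t)))) h = 0 := by
    refine wsum_zero_of_le ?_
    intro x hx
    have := List.of_mem_filter hx
    simp at this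
    omega
  have e3 : wsum (Trees.filter (fun t => decide (0 < t))) h = wsum done h + wsum rest h := by
    rw [← wsum_perm hperm h, wsum_append]
  have e4 : wsum done h = done.sum - h * done.length :=
    wsum_eq_of_gt (fun x hx => by have := hd x hx; omega)
  have e5 : wsum rest h = 0 := wsum_zero_of_le hrle
  rw [e1, e2, e3, e4, e5, hsum, hc]
  ring

-- B's sweep satisfies the characterization
theorem loopB_char (Trees : List Int) (M T : Int) (hM : 0 < M) (hT : 0 ≤ T) :
    ∀ rest done S c hi,
    S = done.sum → c = (done.length : Int) →
    (done ++ rest).Perm (Trees.filter (fun t => decide (0 < t))) →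
    (∀ x ∈ done, hi < x) →
    List.Pairwise (fun a b => b ≤ a) rest →
    (∀ x ∈ rest, 0 < x) →
    0 ≤ hi → hi ≤ T →
    (∀ h, hi < h → h ≤ T → wsum Trees h < M) →
    WChar Trees M T (FindWoodAltLoop M rest S c hi) := by
  intro rest
  induction rest with
  | nil =>
    intro done S c hi hsum hc hperm hd hpw hpos hhi0 hhiT hreg
    simp only [FindWoodAltLoop]
    have hform : ∀ h, 0 ≤ h → h ≤ hi → wsum Trees h = S - h * c :=
      fun h h0 hh => wsum_state Trees done [] S c h hi hperm hsum hc hd (by simp) h0 hh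
    by_cases hcp : 0 < c
    · rw [if_pos hcp]
      set cand := PySem.Int.floordiv (S - M) c with hcanddef
      have hiff : ∀ h, 0 ≤ h → h ≤ hi → (M ≤ wsum Trees h ↔ h ≤ cand) := by
        intro h h0 hh
        rw [hform h h0 hh, hcanddef, PySem.Int.le_floordiv_iff_mul_le hcp]
        constructor <;> intro <;> nlinarith
      by_cases hc0 : 0 ≤ cand
      · rw [if_pos hc0]
        by_cases hch : cand < hi
        · rw [if_pos hch]
          refine ⟨hc0, by omega, Or.inl ((hiff cand hc0 (by omega)).2 le_rfl), ?_⟩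
          intro h hh hhT
          by_cases hcase : h ≤ hi
          · have := (hiff h (by omega) hcase).not.2 (by omega)
            omega
          · exact hreg h (by omega) hhT
        · rw [if_neg hch]
          refine ⟨hhi0, hhiT, Or.inl ((hiff hi hhi0 le_rfl).2 (by omega)), ?_⟩
          intro h hh hhT
          exact hreg h (by omega) hhT
      · rw [if_neg hc0]
        refine ⟨le_rfl, hT, Or.inr rfl, ?_⟩
        intro h hh hhT
        by_cases hcase : h ≤ hi
        · have := (hiff h (by omega) hcase).not.2 (by omega)
          omega
        · exact hreg h (by omega) hhT
    · rw [if_neg hcp]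
      refine ⟨le_rfl, hT, Or.inr rfl, ?_⟩
      intro h hh hhT
      by_cases hcase : h ≤ hi
      · have hdone : done = [] := by
          cases done with
          | nil => rfl
          | cons a t => simp at hc; omega
        rw [hdone] at hsum hc
        simp at hsum hc
        have hw := hform h (by omega) hcase
        rw [hsum, hc] at hw
        simp at hw
        omega
      · exact hreg h (by omega) hhT
  | cons v rest ihr =>
    intro done S c hi hsum hc hperm hd hpw hpos hhi0 hhiT hreg
    have hv : 0 < v := hpos v (by simp)
    have hrle : ∀ x ∈ rest, x ≤ v := by
      intro x hx
      exact (List.pairwise_cons.1 hpw).1 x hx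
    have hperm' : ((done ++ [v]) ++ rest).Perm (Trees.filter (fun t => decide (0 < t))) := by
      rw [List.append_assoc]
      simpa using hperm
    have hsum' : S + v = (done ++ [v]).sum := by simp [hsum]
    have hc' : c + 1 = ((done ++ [v]).length : Int) := by
      rw [hc]
      simp [List.length_append]
    have hpw' : List.Pairwise (fun a b => b ≤ a) rest := (List.pairwise_cons.1 hpw).2
    have hpos' : ∀ x ∈ rest, 0 < x := fun x hx => hpos x (by simp [hx])
    simp only [FindWoodAltLoop]
    by_cases hvhi : v ≤ hi
    · rw [if_pos hvhi]
      have hform : ∀ h, v ≤ h → h ≤ hi → wsum Trees h = S - h * c := by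
        intro h hvh hh
        exact wsum_state Trees done (v :: rest) S c h hi hperm hsum hc hd
          (by intro x hx; rcases List.mem_cons.1 hx with h1 | h1
              · omega
              · have := hrle x h1; omega)
          (by omega) hh
      by_cases hcp : 0 < c
      · rw [if_pos hcp]
        set cand := PySem.Int.floordiv (S - M) c with hcanddef
        have hiff : ∀ h, v ≤ h → h ≤ hi → (M ≤ wsum Trees h ↔ h ≤ cand) := by
          intro h h0 hh
          rw [hform h h0 hh, hcanddef, PySem.Int.le_floordiv_iff_mul_le hcp]
          constructor <;> intro <;> nlinarith
        by_cases hvc : v ≤ cand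
        · rw [if_pos hvc]
          by_cases hch : cand < hi
          · rw [if_pos hch]
            refine ⟨by omega, by omega, Or.inl ((hiff cand hvc (by omega)).2 le_rfl), ?_⟩
            intro h hh hhT
            by_cases hcase : h ≤ hi
            · have := (hiff h (by omega) hcase).not.2 (by omega)
              omega
            · exact hreg h (by omega) hhT
          · rw [if_neg hch]
            refine ⟨by omega, hhiT, Or.inl ((hiff hi (by omega) le_rfl).2 (by omega)), ?_⟩
            intro h hh hhT
            exact hreg h (by omega) hhT
        · rw [if_neg hvc]
          refine ihr (done ++ [v]) (S + v) (c + 1) (v - 1) hsum' hc' hperm'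
            (by intro x hx
                rcases List.mem_append.1 hx with h1 | h1
                · have := hd x h1; omega
                · simp at h1; omega)
            hpw' hpos' (by omega) (by omega) ?_
          intro h hh hhT
          by_cases hcase : h ≤ hi
          · have := (hiff h (by omega) hcase).not.2 (by omega)
            omega
          · exact hreg h (by omega) hhT
      · rw [if_neg hcp]
        refine ihr (done ++ [v]) (S + v) (c + 1) (v - 1) hsum' hc' hperm'
          (by intro x hx
              rcases List.mem_append.1 hx with h1 | h1
              · have := hd x h1; omega
              · simp at h1; omega)
          hpw' hpos' (by omega) (by omega) ?_
        intro h hh hhT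
        by_cases hcase : h ≤ hi
        · have hdone : done = [] := by
            cases done with
            | nil => rfl
            | cons a t => simp at hc; omega
          rw [hdone] at hsum hc
          simp at hsum hc
          have hw := hform h (by omega) hcase
          rw [hsum, hc] at hw
          simp at hw
          omega
        · exact hreg h (by omega) hhT
    · rw [if_neg hvhi]
      exact ihr (done ++ [v]) (S + v) (c + 1) hi hsum' hc' hperm'
        (by intro x hx
            rcases List.mem_append.1 hx with h1 | h1
            · exact hd x h1
            · simp at h1; omega)
        hpw' hpos' hhi0 hhiT hreg

-- last element of the ascending sort is the maximum
theorem sorted_getLast_eq_max (Trees : List Int) (hne : Trees ≠ [])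
    (top : Int) (htop : PySem.List.max? Trees (fun x => x) = some top) :
    (PySem.List.sorted Trees (fun x => x) false).getLast
      (fun h => hne ((PySem.List.sorted_eq_nil_iff Trees (fun x => x) false).1 h)) = top := by
  set ts := PySem.List.sorted Trees (fun x => x) false with hts
  have hperm : ts.Perm Trees := PySem.List.sorted_perm Trees (fun x => x) false
  have htsne : ts ≠ [] := fun h => hne ((PySem.List.sorted_eq_nil_iff Trees (fun x => x) false).1 h)
  have hmax := PySem.List.max?_isMax htop
  have hlastmem : ts.getLast htsne ∈ Trees := hperm.mem_iff.1 (List.getLast_mem htsne)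
  have h1 : ts.getLast htsne ≤ top := hmax _ hlastmem
  have htopmem : top ∈ ts := hperm.mem_iff.2 (PySem.List.max?_mem htop)
  have hpw : ts.Pairwise (fun a b => a ≤ b) := PySem.List.sorted_pairwise Trees (fun x => x)
  obtain ⟨i, hi, hei⟩ := List.mem_iff_getElem.1 htopmem
  have hlast : ts.getLast htsne = ts[ts.length - 1] := List.getLast_eq_getElem htsne
  have h2 : top ≤ ts.getLast htsne := by
    rw [hlast, ← hei]
    rcases Nat.lt_or_ge i (ts.length - 1) with hc | hc
    · exact List.pairwise_iff_getElem.1 hpw i (ts.length - 1) hi (by omega) hc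
    · have : i = ts.length - 1 := by omega
      simp [this]
  exact le_antisymm h1 h2

theorem WChar_A (Trees : List Int) (M top : Int) (hne : Trees ≠ [])
    (htop : PySem.List.max? Trees (fun x => x) = some top) (h0 : 0 ≤ top) :
    WChar Trees M top (FindWood Trees M) := by
  unfold FindWood
  set ts := PySem.List.sorted Trees (fun x => x) false with hts
  have htsne : ts ≠ [] := fun h => hne ((PySem.List.sorted_eq_nil_iff Trees (fun x => x) false).1 h)
  have hlast : PySem.List.pyGetD ts (-1) 0 = ts.getLast htsne :=
    PySem.List.pyGetD_neg_one ts 0 htsne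
  have hlasttop : ts.getLast htsne = top := sorted_getLast_eq_max Trees hne top htop
  have hperm : ts.Perm Trees := PySem.List.sorted_perm Trees (fun x => x) false
  have hchar : WChar ts M top (FindWoodLoop ts M 0 (PySem.List.pyGetD ts (-1) 0) 0) := by
    rw [hlast, hlasttop]
    exact loopA_char ts M top h0 (top - 0 + 1).toNat 0 top 0 le_rfl le_rfl le_rfl
      (Or.inl ⟨rfl, rfl⟩) (fun h hh hhT => by omega)
  obtain ⟨c1, c2, c3, c4⟩ := hchar
  refine ⟨c1, c2, ?_, ?_⟩
  · rwa [wsum_perm hperm] at c3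
  · intro h hh hhT
    have := c4 h hh hhT
    rwa [wsum_perm hperm] at this

theorem WChar_B (Trees : List Int) (M top : Int) (hne : Trees ≠ [])
    (htop : PySem.List.max? Trees (fun x => x) = some top) (h0 : 0 ≤ top) :
    WChar Trees M top (FindWood_alt Trees M) := by
  unfold FindWood_alt
  rw [htop]
  simp only
  rw [if_neg (by omega : ¬ top < 0)]
  have hmax := PySem.List.max?_isMax htop
  by_cases hM : M ≤ 0
  · rw [if_pos hM]
    refine ⟨h0, le_rfl, Or.inl ?_, fun h hh hhT => by omega⟩
    have : wsum Trees top = 0 := wsum_zero_of_le (fun x hx => hmax x hx)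
    omega
  · rw [if_neg hM]
    refine loopB_char Trees M top (by omega) h0 _ [] 0 0 top rfl (by simp) ?_
      (by simp) ?_ ?_ h0 le_rfl (fun h hh hhT => by omega)
    · simpa using PySem.List.sorted_perm (Trees.filter (fun t => decide (0 < t)))
        (fun x => x) true
    · exact PySem.List.sorted_pairwise_rev _ (fun x => x)
    · intro x hx
      have hmem : x ∈ Trees.filter (fun t => decide (0 < t)) :=
        (PySem.List.mem_sorted _ _ _ _).1 hx
      have := List.of_mem_filter hmem
      simpa using this

-- ===== VERDICT (by name: the statement is the Claim_ definition above) =====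
theorem FindWood_spec : Claim_equal_FindWood := by
  intro Trees M _hdom hpre
  have hne : Trees ≠ [] := hpre
  unfold Spec_FindWood
  obtain ⟨top, htop⟩ : ∃ t, PySem.List.max? Trees (fun x => x) = some t := by
    cases h : PySem.List.max? Trees (fun x => x) with
    | none => exact absurd ((PySem.List.max?_eq_none_iff Trees (fun x => x)).1 h) hne
    | some t => exact ⟨t, rfl⟩
  by_cases h0 : 0 ≤ top
  · exact WChar_unique (WChar_A Trees M top hne htop h0) (WChar_B Trees M top hne htop h0)
  · -- all trees negative: both sides return 0
    have hmax := PySem.List.max?_isMax htop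
    have hA : FindWood Trees M = 0 := by
      have htsne : PySem.List.sorted Trees (fun x => x) false ≠ [] :=
        fun h => hne ((PySem.List.sorted_eq_nil_iff Trees (fun x => x) false).1 h)
      have he : FindWood Trees M = FindWoodLoop (PySem.List.sorted Trees (fun x => x) false)
          M 0 (PySem.List.pyGetD (PySem.List.sorted Trees (fun x => x) false) (-1) 0) 0 := rfl
      rw [he, PySem.List.pyGetD_neg_one _ 0 htsne,
        sorted_getLast_eq_max Trees hne top htop, FindWoodLoop, dif_neg (by omega)]
    have hB : FindWood_alt Trees M = 0 := by
      unfold FindWood_alt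
      rw [htop]
      simp only
      rw [if_pos (by omega : top < 0)]
    rw [hA, hB]
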